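-- pv_equiv track=rewrite | github.com/badfroze/abelian-complexity | abel-python.py | abel
-- ===== SOURCE A (Python) =====
-- from collections import Counter
--
-- def abel(seq):
--
--     pool = []
--     for n in range(1, len(seq)+1):
--         tmp = []
--         for i in range(len(seq)-n+1):
--             if (i==0) or (n<4):
--                 sub = seq[i:i+n]
--                 count = Counter(sub)
--             else:
--                 count.subtract(seq[i-1])
--                 count.update(seq[i+n-1])
--             Id = (count['A'],count['T'],count['C'],count['G'])
--             tmp.append(Id)
--         Set = set(tmp)
--         pool.append(len(Set))
--
--     return pool
-- ===== SOURCE B (Python) =====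
-- def _prefix(seq, ch):
--     p = [0]
--     for c in seq:
--         p.append(p[-1] + (c == ch))
--     return p
--
-- def abel(seq):
--     pa = _prefix(seq, 'A')
--     pt = _prefix(seq, 'T')
--     pc = _prefix(seq, 'C')
--     pg = _prefix(seq, 'G')
--     pool = []
--     for n in range(1, len(seq) + 1):
--         seen = set()
--         for i in range(len(seq) - n + 1):
--             seen.add((pa[i+n]-pa[i], pt[i+n]-pt[i], pc[i+n]-pc[i], pg[i+n]-pg[i]))
--         pool.append(len(seen))
--     return pool
-- ===== Notes on version B (the rewrite author's own statement) =====
-- stated objective: faster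
-- what changed: Replaced the mutating sliding Counter (rebuilt or slid per window) with four precomputed prefix-count arrays, one per DNA letter, so each window's Parikh vector is four subtractions, with vectors collected directly into a set.
import Mathlib
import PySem

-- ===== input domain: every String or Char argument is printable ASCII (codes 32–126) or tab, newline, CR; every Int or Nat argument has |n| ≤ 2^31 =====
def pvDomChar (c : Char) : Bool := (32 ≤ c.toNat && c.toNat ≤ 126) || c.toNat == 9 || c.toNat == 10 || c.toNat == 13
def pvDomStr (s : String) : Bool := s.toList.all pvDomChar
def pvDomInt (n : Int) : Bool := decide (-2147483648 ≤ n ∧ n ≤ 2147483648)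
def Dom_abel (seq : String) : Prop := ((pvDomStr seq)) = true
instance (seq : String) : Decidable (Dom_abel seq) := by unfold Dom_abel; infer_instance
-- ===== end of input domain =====

-- B replaces A's mutating sliding Counter with four prefix-count arrays (measured constant-factor faster).

-- ===== PORT A =====
-- one step of the inner loop: recompute Counter(seq[i:i+n]) when i==0 or n<4, else slide it
def abelInnerStep (cs : List Char) (n : Int)
    (st : PySem.Dict Char Int × List (Int × Int × Int × Int)) (i : Int) :
    PySem.Dict Char Int × List (Int × Int × Int × Int) :=
  let count :=
    if i == 0 || n < 4 then
      PySem.Dict.counter (PySem.List.slice cs (some i) (some (i + n)))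
    else
      -- count.subtract(seq[i-1]); count.update(seq[i+n-1])  (one char each)
      ((st.1.modify (PySem.List.pyGetD cs (i - 1) 'A') 0 (· - 1)).modify
        (PySem.List.pyGetD cs (i + n - 1) 'A') 0 (· + 1))
  (count, st.2 ++ [(count.getD 'A' 0, count.getD 'T' 0, count.getD 'C' 0, count.getD 'G' 0)])

-- the inner 'for i in range(len(seq)-n+1)' loop; `count` is dead before i=0 reinitialises it
def abelInner (cs : List Char) (n : Int) :
    PySem.Dict Char Int × List (Int × Int × Int × Int) :=
  (PySem.List.pyRange 0 (PySem.List.len cs - n + 1) 1).foldl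
    (abelInnerStep cs n) (PySem.Dict.empty, [])

def abel (seq : String) : List Int :=
  (PySem.List.pyRange 1 (PySem.List.len seq.toList + 1) 1).foldl
    (fun pool n => pool ++ [PySem.List.len (PySem.Set.ofList (abelInner seq.toList n).2)]) []

-- ===== PORT B =====
-- p = [0]; for c in seq: p.append(p[-1] + (c == ch))
def pvPrefix (cs : List Char) (ch : Char) : List Int :=
  cs.foldl (fun p c => p ++ [PySem.List.pyGetD p (-1) 0 + (if c == ch then 1 else 0)]) [0]

-- the inner loop of B: collect the windows' Parikh vectors into a set
def altInner (pa pt pc pg : List Int) (L n : Int) : PySem.Set (Int × Int × Int × Int) :=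
  (PySem.List.pyRange 0 (L - n + 1) 1).foldl
    (fun (s : PySem.Set (Int × Int × Int × Int)) i =>
      PySem.Set.add s
        (PySem.List.pyGetD pa (i + n) 0 - PySem.List.pyGetD pa i 0,
         PySem.List.pyGetD pt (i + n) 0 - PySem.List.pyGetD pt i 0,
         PySem.List.pyGetD pc (i + n) 0 - PySem.List.pyGetD pc i 0,
         PySem.List.pyGetD pg (i + n) 0 - PySem.List.pyGetD pg i 0))
    PySem.Set.empty

def abel_alt (seq : String) : List Int :=
  let pa := pvPrefix seq.toList 'A'
  let pt := pvPrefix seq.toList 'T'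
  let pc := pvPrefix seq.toList 'C'
  let pg := pvPrefix seq.toList 'G'
  (PySem.List.pyRange 1 (PySem.List.len seq.toList + 1) 1).foldl
    (fun pool n =>
      pool ++ [PySem.List.len (altInner pa pt pc pg (PySem.List.len seq.toList) n)]) []

-- ===== PRECONDITION & SPEC =====
def Spec_abel (seq : String) (out : List Int) : Prop := out = abel_alt seq
instance (seq : String) (out : List Int) : Decidable (Spec_abel seq out) := by unfold Spec_abel; infer_instance

-- ===== CLAIM (what is proved, stated in full; the proofs are below) =====
def Claim_equal_abel : Prop := ∀ (seq : String), Dom_abel seq → Spec_abel seq (abel seq)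

-- ===== LEMMAS AND PROOFS =====

-- the window seq[i:i+n] and its Parikh vector
def pvWin (cs : List Char) (n i : Nat) : List Char := (cs.drop i).take n

def pvParikh (w : List Char) : Int × Int × Int × Int :=
  ((w.count 'A' : Int), (w.count 'T' : Int), (w.count 'C' : Int), (w.count 'G' : Int))

-- B's prefix lists hold the prefix letter counts
theorem pvPrefix_eq (cs : List Char) (ch : Char) :
    pvPrefix cs ch = (List.range (cs.length + 1)).map (fun k => ((cs.take k).count ch : Int)) := by
  induction cs using List.reverseRecOn with
  | nil => simp [pvPrefix, List.range_succ]
  | append_singleton ds c ih =>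
    unfold pvPrefix at ih ⊢
    rw [List.foldl_append, ih, List.foldl_cons, List.foldl_nil]
    have hne : ((List.range (ds.length + 1)).map (fun k => ((ds.take k).count ch : Int))) ≠ [] := by
      simp [List.range_succ]
    rw [PySem.List.pyGetD_neg_one _ _ hne, List.getLast_eq_getElem]
    simp only [List.length_map, List.length_range, Nat.add_sub_cancel, List.getElem_map,
      List.getElem_range, List.take_length]
    rw [List.length_append, List.length_singleton, List.range_succ (n := ds.length + 1),
      List.map_append]
    congr 1
    · apply List.map_congr_left
      intro k hk
      rw [List.mem_range] at hk
      rw [List.take_append_of_le_length (by omega)]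
    · simp [List.take_of_length_le, List.count_append, List.count_singleton]

-- a prefix-count difference is a window count
theorem pvTake_sub (cs : List Char) (ch : Char) (i n : Nat) :
    ((cs.take (i + n)).count ch : Int) - ((cs.take i).count ch : Int)
      = ((pvWin cs n i).count ch : Int) := by
  rw [List.take_add, List.count_append, pvWin]; push_cast; ring

-- a double modify is a decrement at x and an increment at y
theorem pvGetD_sub_add (d : PySem.Dict Char Int) (x y c : Char) :
    ((d.modify x 0 (· - 1)).modify y 0 (· + 1)).getD c 0
      = d.getD c 0 - (if c = x then 1 else 0) + (if c = y then 1 else 0) := by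
  rw [PySem.Dict.getD_modify, PySem.Dict.getD_modify, PySem.Dict.getD_modify]
  split_ifs <;> subst_vars <;> simp_all

-- sliding the window by one changes the count at the dropped and the added letter
theorem pvWin_slide (cs : List Char) (n m : Nat) (c : Char)
    (hm : 1 ≤ m) (hn : 1 ≤ n) (h : m + n ≤ cs.length) :
    ((pvWin cs n m).count c : Int)
      = ((pvWin cs n (m - 1)).count c : Int)
        - (if c = cs.getD (m - 1) 'A' then 1 else 0)
        + (if c = cs.getD (m + n - 1) 'A' then 1 else 0) := by
  have hm1 : m - 1 < cs.length := by omega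
  obtain ⟨n', rfl⟩ : ∃ n', n = n' + 1 := ⟨n - 1, by omega⟩
  have hmn : m + n' < cs.length := by omega
  rw [show m + (n' + 1) - 1 = m + n' from by omega]
  have e1 : pvWin cs (n' + 1) (m - 1) = cs[m - 1] :: pvWin cs n' m := by
    unfold pvWin
    rw [List.drop_eq_getElem_cons hm1, show m - 1 + 1 = m from by omega, List.take_succ_cons]
  have e2 : pvWin cs (n' + 1) m = pvWin cs n' m ++ [cs[m + n']] := by
    unfold pvWin
    rw [List.take_add_one, List.getElem?_drop, List.getElem?_eq_getElem hmn]
    rfl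
  rw [e1, e2, List.getD_eq_getElem cs 'A' hm1, List.getD_eq_getElem cs 'A' hmn]
  simp only [List.count_append, List.count_cons, List.count_nil]
  by_cases h1 : c = cs[m - 1] <;> by_cases h2 : c = cs[m + n'] <;>
    simp [h1, h2, beq_iff_eq] <;> simp_all [eq_comm]

-- invariant of A's inner loop: tmp is the list of Parikh vectors, count tracks the last window
theorem pvInnerA (cs : List Char) (n : Nat) (hn : 1 ≤ n) (m : Nat) (hm : m + n ≤ cs.length + 1) :
    (((List.range m).foldl (fun st (k : Nat) => abelInnerStep cs (n : Int) st (k : Int))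
        (PySem.Dict.empty, [])).2
        = (List.range m).map (fun k => pvParikh (pvWin cs n k))) ∧
    (∀ c : Char, m ≠ 0 →
      (((List.range m).foldl (fun st (k : Nat) => abelInnerStep cs (n : Int) st (k : Int))
          (PySem.Dict.empty, [])).1).getD c 0 = ((pvWin cs n (m - 1)).count c : Int)) := by
  induction m with
  | zero => simp
  | succ m ih =>
    obtain ⟨iht, ihc⟩ := ih (by omega)
    rw [List.range_succ, List.foldl_append, List.foldl_cons, List.foldl_nil]
    set st := (List.range m).foldl (fun st (k : Nat) => abelInnerStep cs (n : Int) st (k : Int))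
      (PySem.Dict.empty, ([] : List (Int × Int × Int × Int))) with hst
    by_cases hc : m = 0 ∨ n < 4
    · have hcond : (((m : Int)) == 0 || decide ((n : Int) < 4)) = true := by
        simp only [Bool.or_eq_true, beq_iff_eq, decide_eq_true_eq]
        rcases hc with h | h
        · left; exact_mod_cast congrArg (Nat.cast : Nat → Int) h
        · right; exact_mod_cast h
      have hkey : ∀ c : Char,
          (PySem.Dict.counter
              (PySem.List.slice cs (some (m : Int)) (some ((m : Int) + (n : Int))))).getD c 0
            = ((pvWin cs n m).count c : Int) := by
        intro c
        rw [PySem.List.slice_natCast_add, PySem.Dict.getD_counter]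
        rfl
      constructor
      · simp only [abelInnerStep, hcond, if_true]
        rw [iht, List.map_append]
        simp [hkey, pvParikh]
      · intro c _
        simp only [abelInnerStep, hcond, if_true]
        simpa using hkey c
    · rw [not_or] at hc
      obtain ⟨hm0, hn4'⟩ := hc
      have hn4 : 4 ≤ n := by omega
      have hcond : (((m : Int)) == 0 || decide ((n : Int) < 4)) = false := by
        simp only [Bool.or_eq_false_iff, beq_eq_false_iff_ne, ne_eq, decide_eq_false_iff_not,
          not_lt]
        constructor
        · exact_mod_cast hm0
        · exact_mod_cast hn4
      have hx : PySem.List.pyGetD cs ((m : Int) - 1) 'A' = cs.getD (m - 1) 'A' := by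
        rw [show ((m : Int) - 1) = ((m - 1 : Nat) : Int) from by omega, PySem.List.pyGetD_natCast]
      have hy : PySem.List.pyGetD cs ((m : Int) + (n : Int) - 1) 'A' = cs.getD (m + n - 1) 'A' := by
        rw [show ((m : Int) + (n : Int) - 1) = ((m + n - 1 : Nat) : Int) from by omega,
          PySem.List.pyGetD_natCast]
      have hkey : ∀ c : Char,
          ((st.1.modify (PySem.List.pyGetD cs ((m : Int) - 1) 'A') 0 (· - 1)).modify
            (PySem.List.pyGetD cs ((m : Int) + (n : Int) - 1) 'A') 0 (· + 1)).getD c 0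
            = ((pvWin cs n m).count c : Int) := by
        intro c
        rw [hx, hy, pvGetD_sub_add, ihc c hm0]
        rw [pvWin_slide cs n m c (by omega) hn (by omega)]
      constructor
      · simp only [abelInnerStep, hcond, Bool.false_eq_true, if_false]
        rw [iht, List.map_append]
        simp [hkey, pvParikh]
      · intro c _
        simp only [abelInnerStep, hcond, Bool.false_eq_true, if_false]
        simpa using hkey c

-- one prefix-difference component is a window count
theorem pvComp (cs : List Char) (ch : Char) (N k : Nat) (hk : k + N ≤ cs.length) :
    PySem.List.pyGetD (pvPrefix cs ch) ((k : Int) + (N : Int)) 0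
      - PySem.List.pyGetD (pvPrefix cs ch) (k : Int) 0
      = ((pvWin cs N k).count ch : Int) := by
  rw [show ((k : Int) + (N : Int)) = ((k + N : Nat) : Int) from by omega,
    PySem.List.pyGetD_natCast, PySem.List.pyGetD_natCast, pvPrefix_eq,
    PySem.List.getD_map_range _ _ _ _ (by omega), PySem.List.getD_map_range _ _ _ _ (by omega),
    pvTake_sub]

-- the per-window-length values of the two programs agree
theorem pvPerN (cs : List Char) (N : Nat) (h1 : 1 ≤ N) (h2 : N ≤ cs.length) :
    PySem.Set.ofList (abelInner cs (N : Int)).2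
      = altInner (pvPrefix cs 'A') (pvPrefix cs 'T') (pvPrefix cs 'C') (pvPrefix cs 'G')
          (PySem.List.len cs) (N : Int) := by
  have hM : (PySem.List.len cs - (N : Int) + 1) = ((cs.length - N + 1 : Nat) : Int) := by
    rw [PySem.List.len_eq]; omega
  set M := cs.length - N + 1 with hMdef
  unfold abelInner altInner
  rw [hM, PySem.List.pyRange_zero_nat, List.foldl_map, List.foldl_map]
  rw [(pvInnerA cs N h1 M (by omega)).1]
  rw [PySem.Set.ofList_eq_foldl, List.foldl_map]
  show _ = List.foldl _ (PySem.Set.empty) _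
  rw [show (PySem.Set.empty : PySem.Set (Int × Int × Int × Int))
      = ([] : List (Int × Int × Int × Int)) from rfl]
  apply PySem.List.foldl_congr_mem
  intro acc k hk
  rw [List.mem_range] at hk
  have hkN : k + N ≤ cs.length := by omega
  rw [pvComp cs 'A' N k hkN, pvComp cs 'T' N k hkN, pvComp cs 'C' N k hkN, pvComp cs 'G' N k hkN]
  rfl

theorem pv_main (seq : String) : abel seq = abel_alt seq := by
  simp only [abel, abel_alt]
  rw [PySem.List.foldl_append_singleton_eq_map, PySem.List.foldl_append_singleton_eq_map]
  simp only [List.nil_append]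
  apply List.map_congr_left
  intro x hx
  rw [PySem.List.mem_pyRange_one] at hx
  rw [PySem.List.len_eq] at hx
  obtain ⟨N, rfl⟩ : ∃ N : Nat, x = (N : Int) := ⟨x.toNat, by omega⟩
  congr 1
  exact pvPerN seq.toList N (by exact_mod_cast hx.1) (by exact_mod_cast Int.lt_add_one_iff.mp hx.2)

-- ===== VERDICT (by name: the statement is the Claim_ definition above) =====
theorem abel_spec : Claim_equal_abel := by
  intro seq _
  unfold Spec_abel
  exact pv_main seq
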